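-- pv_equiv track=rewrite | github.com/wrosz/art-gallery-problem | agp_project/pliki_zrodlowe/triangulacja.py | min_guards
-- ===== SOURCE A (Python) =====
-- def min_guards(coloring):
--     '''Zwraca dwa obiekty:
--     guards - lista ze strażnikami (współrzędnymi wierzchołków pokolorowanych na najrzadziej występujący kolor
--     min_color - liczba 0, 1 lub 2 oznaczająca najrzadziej występujący kolor
--     '''
--     colors_occ = [0, 0, 0]
--     guards = []
--     for vertex, color in coloring.items():
--         colors_occ[color] += 1
--     min_occ = min(colors_occ)  # minimalna liczba strażników
--     min_color = colors_occ.index(min_occ)  # kolor tych strażników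
--     for vertex, color in coloring.items():
--         if color == min_color:
--             guards.append(vertex)
--     return guards, min_color
-- ===== SOURCE B (Python) =====
-- def min_guards(coloring):
--     '''Zwraca dwa obiekty:
--     guards - lista ze strażnikami (współrzędnymi wierzchołków pokolorowanych na najrzadziej występujący kolor
--     min_color - liczba 0, 1 lub 2 oznaczająca najrzadziej występujący kolor
--     '''
--     # one grouping pass: bucket each vertex under its color, then pick the
--     # smallest bucket (lowest color index wins ties, as min() keeps the first)
--     buckets = {0: [], 1: [], 2: []}
--     for vertex, color in coloring.items():
--         buckets[color].append(vertex)
--     min_color = min(range(3), key=lambda c: len(buckets[c]))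
--     return buckets[min_color], min_color
-- ===== Notes on version B (the rewrite author's own statement) =====
-- stated objective: alternative
-- what changed: replaces A's count-then-filter scheme (occurrence counts, min/.index, then a second filtering pass) by a single grouping pass into per-color buckets followed by an argmin over the three bucket sizes
-- outside the precondition, e.g. on min_guards({(0,): -1}): A returns ([], 0), B raises KeyError
import Mathlib
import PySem

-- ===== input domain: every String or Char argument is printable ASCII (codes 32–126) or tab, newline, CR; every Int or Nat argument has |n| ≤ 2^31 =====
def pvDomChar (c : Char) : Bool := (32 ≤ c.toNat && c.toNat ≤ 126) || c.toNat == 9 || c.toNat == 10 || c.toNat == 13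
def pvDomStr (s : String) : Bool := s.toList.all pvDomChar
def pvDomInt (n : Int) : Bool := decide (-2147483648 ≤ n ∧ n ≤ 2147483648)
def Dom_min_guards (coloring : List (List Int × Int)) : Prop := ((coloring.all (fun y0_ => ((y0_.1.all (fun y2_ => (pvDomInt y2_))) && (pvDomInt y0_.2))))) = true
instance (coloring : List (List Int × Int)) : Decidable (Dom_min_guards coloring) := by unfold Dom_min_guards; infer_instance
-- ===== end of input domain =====

-- B groups vertices into per-color buckets in one pass and picks the smallest bucket,
-- instead of A's count-then-filter scheme; same cost, different decomposition.

-- ===== PORT A =====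
-- literal port of A: count occurrences in a 3-slot list, take min and its first
-- index, then filter.  The .getD 0 / | none => 0 defaults only make the port total:
-- colors_occ always has 3 elements and min_occ is a member, so they never fire.
def min_guards (coloring : List (List Int × Int)) : List (List Int) × Int :=
  let colors_occ := coloring.foldl
    (fun occ vc => PySem.List.pySetD occ vc.2 (PySem.List.pyGetD occ vc.2 0 + 1)) [0, 0, 0]
  let min_occ : Int := (PySem.List.min? colors_occ (fun x => x)).getD 0
  let min_color : Int := match PySem.List.index? colors_occ min_occ with
    | some k => (k : Int)
    | none => 0
  let guards := coloring.foldl (fun g vc => if vc.2 == min_color then g ++ [vc.1] else g) []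
  (guards, min_color)

-- ===== PORT B =====
-- literal port of B: one grouping pass into the three per-color buckets, then
-- min(range(3), key=lambda c: len(buckets[c])).  Dict.modify's default [] never
-- fires under Pre_ (the three keys are present from the start), matching Python's
-- buckets[color] that would raise KeyError only on colors Pre_ excludes.
def min_guards_alt (coloring : List (List Int × Int)) : List (List Int) × Int :=
  let buckets := coloring.foldl
    (fun b vc => PySem.Dict.modify b vc.2 [] (fun l => l ++ [vc.1]))
    (PySem.Dict.ofList [(0, []), (1, []), (2, [])])
  let min_color : Int := (PySem.List.min? (PySem.List.pyRange 0 3 1)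
      (fun c => PySem.List.len (PySem.Dict.getD buckets c []))).getD 0
  (PySem.Dict.getD buckets min_color [], min_color)

-- ===== PRECONDITION & SPEC =====
-- Pre_ excludes colorings containing a color outside {0,1,2}: for colors outside
-- [-3,2] A raises IndexError, and on negative colors -3..-1 (where A returns via
-- Python's negative-index wraparound) B's bucket lookup itself raises KeyError.
def Pre_min_guards (coloring : List (List Int × Int)) : Prop :=
  ∀ p ∈ coloring, p.2 = 0 ∨ p.2 = 1 ∨ p.2 = 2
instance (coloring : List (List Int × Int)) : Decidable (Pre_min_guards coloring) := by
  unfold Pre_min_guards; infer_instance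

def pvWitness_min_guards : (List (List Int × Int)) := [([0, 1], 0), ([2, 3], 1), ([4, 5], 0)]

def Spec_min_guards (coloring : List (List Int × Int)) (out : List (List Int) × Int) : Prop := out = min_guards_alt coloring
instance (coloring : List (List Int × Int)) (out : List (List Int) × Int) : Decidable (Spec_min_guards coloring out) := by unfold Spec_min_guards; infer_instance

-- ===== CLAIM (what is proved, stated in full; the proofs are below) =====
def Claim_equal_min_guards : Prop := ∀ (coloring : List (List Int × Int)), Dom_min_guards coloring → Pre_min_guards coloring → Spec_min_guards coloring (min_guards coloring)

-- ===== LEMMAS AND PROOFS =====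

-- B's grouping loop: bucket c holds the first components of the pairs coloured c.
lemma bucketB (xs : List (List Int × Int)) (d : PySem.Dict Int (List (List Int))) (c : Int) :
    (xs.foldl (fun b vc => PySem.Dict.modify b vc.2 [] (fun l => l ++ [vc.1])) d).getD c []
    = d.getD c [] ++ (xs.filter (fun p => p.2 == c)).map (·.1) := by
  have h1 : xs.foldl (fun b vc => PySem.Dict.modify b vc.2 [] (fun l => l ++ [vc.1])) d
      = (xs.map (fun vc => (vc.2, vc.1))).foldl
          (fun b p => PySem.Dict.modify b p.1 [] (fun l => l ++ [p.2])) d := by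
    rw [List.foldl_map]
  rw [h1, PySem.Dict.getD_foldl_modify_append]
  simp [List.filter_map, Function.comp_def, List.map_map]

-- one step of A's counting loop on a 3-slot list, for a color in {0,1,2}
lemma occ_step (b0 b1 b2 c : Int) (h : c = 0 ∨ c = 1 ∨ c = 2) :
    PySem.List.pySetD [b0, b1, b2] c (PySem.List.pyGetD [b0, b1, b2] c 0 + 1)
    = [if c = 0 then b0 + 1 else b0, if c = 1 then b1 + 1 else b1, if c = 2 then b2 + 1 else b2] := by
  rcases h with rfl | rfl | rfl <;>
    norm_num [PySem.List.pySetD, PySem.List.pySet?, PySem.List.pyGetD, PySem.List.pyGet?,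
      PySem.List.pyIdx?] <;> rfl

-- A's counting loop adds the per-color counts to the three slots.
lemma occA (xs : List (List Int × Int)) (h : ∀ p ∈ xs, p.2 = 0 ∨ p.2 = 1 ∨ p.2 = 2)
    (a0 a1 a2 : Int) :
    xs.foldl (fun occ vc => PySem.List.pySetD occ vc.2 (PySem.List.pyGetD occ vc.2 0 + 1)) [a0, a1, a2]
    = [a0 + (xs.countP (fun p => p.2 == 0) : Int),
       a1 + (xs.countP (fun p => p.2 == 1) : Int),
       a2 + (xs.countP (fun p => p.2 == 2) : Int)] := by
  induction xs generalizing a0 a1 a2 with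
  | nil => simp
  | cons x t ih =>
    have ht : ∀ p ∈ t, p.2 = 0 ∨ p.2 = 1 ∨ p.2 = 2 := fun p hp => h p (by simp [hp])
    have hx := h x (by simp)
    rw [List.foldl_cons, occ_step _ _ _ _ hx]
    rcases hx with hc | hc | hc <;>
      simp only [hc] <;> norm_num <;> rw [ih ht] <;>
      simp [hc] <;> ring

-- A's "first index of the minimum of [n0,n1,n2]" equals B's
-- "min over [0,1,2] keyed by the counts" (first extremal wins ties on both sides).
lemma argmin3 (n0 n1 n2 : Int) (key : Int → Int)
    (k0 : key 0 = n0) (k1 : key 1 = n1) (k2 : key 2 = n2) :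
    (match PySem.List.index? [n0, n1, n2] ((PySem.List.min? [n0, n1, n2] (fun x => x)).getD 0) with
      | some k => (k : Int)
      | none => 0)
    = (PySem.List.min? [(0 : Int), 1, 2] key).getD 0 := by
  simp only [PySem.List.min?, List.foldl, k0, k1, k2]
  by_cases h10 : n1 < n0 <;> by_cases h21 : n2 < n1 <;> by_cases h20 : n2 < n0 <;>
    simp [h10, h21, h20, PySem.List.index?_eq_idxOf?, List.idxOf?, List.findIdx?,
      List.findIdx?.go, beq_iff_eq] <;>
    split_ifs <;> simp_all <;> omega

lemma min_guards_eq (coloring : List (List Int × Int))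
    (hpre : ∀ p ∈ coloring, p.2 = 0 ∨ p.2 = 1 ∨ p.2 = 2) :
    min_guards coloring = min_guards_alt coloring := by
  unfold min_guards min_guards_alt
  have hrange : PySem.List.pyRange 0 3 1 = [0, 1, 2] := by decide
  have hinit : ∀ c : Int,
      (PySem.Dict.ofList ([((0:Int), ([]:List (List Int))), (1, []), (2, [])])).getD c [] = [] := by
    intro c
    have he : PySem.Dict.ofList ([((0:Int), ([]:List (List Int))), (1, []), (2, [])])
        = ((PySem.Dict.empty.insert 0 []).insert 1 []).insert 2 [] := rfl
    rw [he]
    simp [PySem.Dict.getD_insert, PySem.Dict.getD_empty]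
  have hb : ∀ c : Int,
      (coloring.foldl (fun b vc => PySem.Dict.modify b vc.2 [] (fun l => l ++ [vc.1]))
        (PySem.Dict.ofList [(0, []), (1, []), (2, [])])).getD c []
      = (coloring.filter (fun p => p.2 == c)).map (·.1) := by
    intro c; rw [bucketB, hinit, List.nil_append]
  have hocc := occA coloring hpre 0 0 0
  simp only [zero_add] at hocc
  have hlen : ∀ c : Int,
      PySem.List.len ((coloring.filter (fun p => p.2 == c)).map (·.1))
      = (coloring.countP (fun p => p.2 == c) : Int) := by
    intro c; simp [PySem.List.len_eq, List.countP_eq_length_filter]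
  simp only [hocc, hrange, hb, hlen]
  rw [argmin3 _ _ _ (fun c => (coloring.countP (fun p => p.2 == c) : Int)) rfl rfl rfl]
  rw [PySem.List.foldl_append_if]
  simp

-- ===== VERDICT (by name: the statement is the Claim_ definition above) =====
theorem min_guards_spec : Claim_equal_min_guards := by
  intro coloring _ hpre
  exact min_guards_eq coloring hpre
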